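-- pv_equiv track=rewrite | github.com/P1el3/Prenex-NFA-DFA | Prenex-NFA-DFA/src/Parser.py | replaceChars
-- ===== SOURCE A (Python) =====
-- def replaceChars(type) -> str:
--     chars = '('
--     if type == 0:
--         for i in range(ord('a'), ord('z')):
--             chars = chars + chr(i) + '|'
--         chars = chars + 'z)'
--     if type == 1:
--         for i in range(ord('A'), ord('Z')):
--             chars = chars + chr(i) + '|'
--         chars = chars + 'Z)'
--     return chars
-- ===== SOURCE B (Python) =====
-- def replaceChars(type) -> str:
--     # closed-form dispatch: the alternation strings are constants
--     if type == 0: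
--         return '(a|b|c|d|e|f|g|h|i|j|k|l|m|n|o|p|q|r|s|t|u|v|w|x|y|z)'
--     if type == 1:
--         return '(A|B|C|D|E|F|G|H|I|J|K|L|M|N|O|P|Q|R|S|T|U|V|W|X|Y|Z)'
--     return '('
-- ===== Notes on version B (the rewrite author's own statement) =====
-- stated objective: simpler
-- what changed: Replaces the two character-building loops over ord ranges with a direct three-way dispatch returning the precomputed constant alternation strings.
import Mathlib
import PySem

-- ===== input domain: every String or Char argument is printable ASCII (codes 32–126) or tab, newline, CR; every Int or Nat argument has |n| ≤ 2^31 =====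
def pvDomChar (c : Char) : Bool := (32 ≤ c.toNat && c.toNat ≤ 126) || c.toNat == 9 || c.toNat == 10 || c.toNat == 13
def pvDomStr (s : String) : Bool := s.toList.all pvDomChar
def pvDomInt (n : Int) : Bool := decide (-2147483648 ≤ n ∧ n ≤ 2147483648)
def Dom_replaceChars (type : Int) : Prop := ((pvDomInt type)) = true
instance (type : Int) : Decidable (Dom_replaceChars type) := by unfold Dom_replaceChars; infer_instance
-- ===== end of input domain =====

-- ===== PORT A =====
-- A builds the alternation with a loop; B returns the constant string directly (simpler).
def replaceChars (type : Int) : String :=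
  let chars := "("
  let chars := if type == 0 then
      ((PySem.List.pyRange 97 122 1).foldl
        (fun c i => c ++ String.mk [Char.ofNat i.toNat] ++ "|") chars) ++ "z)"
    else chars
  let chars := if type == 1 then
      ((PySem.List.pyRange 65 90 1).foldl
        (fun c i => c ++ String.mk [Char.ofNat i.toNat] ++ "|") chars) ++ "Z)"
    else chars
  chars

-- ===== PORT B =====
def replaceChars_alt (type : Int) : String :=
  if type == 0 then "(a|b|c|d|e|f|g|h|i|j|k|l|m|n|o|p|q|r|s|t|u|v|w|x|y|z)"
  else if type == 1 then "(A|B|C|D|E|F|G|H|I|J|K|L|M|N|O|P|Q|R|S|T|U|V|W|X|Y|Z)"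
  else "("

-- ===== PRECONDITION & SPEC =====
def Spec_replaceChars (type : Int) (out : String) : Prop := out = replaceChars_alt type
instance (type : Int) (out : String) : Decidable (Spec_replaceChars type out) := by unfold Spec_replaceChars; infer_instance

-- ===== CLAIM (what is proved, stated in full; the proofs are below) =====
def Claim_equal_replaceChars : Prop := ∀ (type : Int), Dom_replaceChars type → Spec_replaceChars type (replaceChars type)

-- ===== LEMMAS AND PROOFS =====

-- ===== VERDICT (by name: the statement is the Claim_ definition above) =====
theorem replaceChars_spec : Claim_equal_replaceChars := by
  intro t _
  unfold Spec_replaceChars replaceChars replaceChars_alt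
  by_cases h0 : t = 0
  · subst h0; decide
  · by_cases h1 : t = 1
    · subst h1; decide
    · simp [h0, h1]
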